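-- pv_equiv track=rewrite | github.com/proballstar/chess-engine-innovate | main.py | king_shield_mask
-- ===== SOURCE A (Python) =====
-- def king_shield_mask(king_square: int, is_white: bool) -> int:
--     file = king_square % 8
--     rank = king_square // 8
--     shield = 0
--     for f in range(max(0, file - 1), min(8, file + 2)):
--         for r in range(rank + (1 if is_white else -1), rank + (3 if is_white else -3), 1 if is_white else -1):
--             if 0 <= r < 8:
--                 shield |= 1 << (r * 8 + f)
--     return shield
-- ===== SOURCE B (Python) =====
-- def king_shield_mask(king_square: int, is_white: bool) -> int:
--     # Closed-form row mask (files file-1..file+1 clipped to the board), then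
--     # OR whole row blocks at the two shield ranks.
--     file = king_square % 8
--     rank = king_square // 8
--     base = (7 << file >> 1) & 0xFF
--     d = 1 if is_white else -1
--     shield = 0
--     for r in (rank + d, rank + 2 * d):
--         if 0 <= r < 8:
--             shield |= base << (8 * r)
--     return shield
-- ===== Notes on version B (the rewrite author's own statement) =====
-- stated objective: simpler
-- what changed: Replaces the nested file/rank loops setting bits square by square with a closed-form clipped row mask ((7<<file>>1)&0xFF) that is shifted as a whole block onto each of the two valid shield ranks.
import Mathlib
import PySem

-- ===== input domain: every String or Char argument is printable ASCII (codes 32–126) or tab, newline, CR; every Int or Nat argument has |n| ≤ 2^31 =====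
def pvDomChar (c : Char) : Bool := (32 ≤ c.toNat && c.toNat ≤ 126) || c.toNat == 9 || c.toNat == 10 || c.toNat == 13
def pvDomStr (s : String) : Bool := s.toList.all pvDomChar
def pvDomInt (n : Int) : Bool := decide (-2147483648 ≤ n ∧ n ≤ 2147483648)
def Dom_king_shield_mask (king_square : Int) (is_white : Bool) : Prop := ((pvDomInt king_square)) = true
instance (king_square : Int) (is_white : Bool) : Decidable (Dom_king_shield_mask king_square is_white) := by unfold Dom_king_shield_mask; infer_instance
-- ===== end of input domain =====

-- B replaces the nested file/rank bit loops with a closed-form clipped row mask shifted onto the two shield ranks (simpler; same cost).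

-- ===== PORT A =====
def king_shield_mask (king_square : Int) (is_white : Bool) : Int :=
  let file := PySem.Int.mod king_square 8
  let rank := PySem.Int.floordiv king_square 8
  (PySem.List.pyRange (max 0 (file - 1)) (min 8 (file + 2)) 1).foldl
    (fun (shield : Int) (f : Int) =>
      (PySem.List.pyRange (rank + (if is_white then 1 else -1))
          (rank + (if is_white then 3 else -3)) (if is_white then 1 else -1)).foldl
        (fun (shield : Int) (r : Int) =>
          if 0 ≤ r ∧ r < 8 then
            -- exponent r*8+f is ≥ 0 under the guard (0 ≤ r, 0 ≤ f), so toNat is exact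
            PySem.Int.bor shield ((1 : Int) <<< (r * 8 + f).toNat)
          else shield) shield) 0

-- ===== PORT B =====
def king_shield_mask_alt (king_square : Int) (is_white : Bool) : Int :=
  let file := PySem.Int.mod king_square 8
  let rank := PySem.Int.floordiv king_square 8
  -- file = king_square % 8 ∈ [0,8), so both shift amounts are ≥ 0 and toNat is exact
  let base := PySem.Int.band (((7 : Int) <<< file.toNat) >>> 1) 255
  let d : Int := if is_white then 1 else -1
  [rank + d, rank + 2 * d].foldl
    (fun (shield : Int) (r : Int) =>
      if 0 ≤ r ∧ r < 8 then PySem.Int.bor shield (base <<< (8 * r).toNat) else shield) 0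

-- ===== PRECONDITION & SPEC =====
def Spec_king_shield_mask (king_square : Int) (is_white : Bool) (out : Int) : Prop := out = king_shield_mask_alt king_square is_white
instance (king_square : Int) (is_white : Bool) (out : Int) : Decidable (Spec_king_shield_mask king_square is_white out) := by unfold Spec_king_shield_mask; infer_instance

-- ===== CLAIM (what is proved, stated in full; the proofs are below) =====
def Claim_equal_king_shield_mask : Prop := ∀ (king_square : Int) (is_white : Bool), Dom_king_shield_mask king_square is_white → Spec_king_shield_mask king_square is_white (king_shield_mask king_square is_white)

-- ===== LEMMAS AND PROOFS =====

-- A's body as a function of (file, rank)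
def shieldA (m q : Int) (w : Bool) : Int :=
  (PySem.List.pyRange (max 0 (m - 1)) (min 8 (m + 2)) 1).foldl
    (fun (shield : Int) (f : Int) =>
      (PySem.List.pyRange (q + (if w then 1 else -1))
          (q + (if w then 3 else -3)) (if w then 1 else -1)).foldl
        (fun (shield : Int) (r : Int) =>
          if 0 ≤ r ∧ r < 8 then
            PySem.Int.bor shield ((1 : Int) <<< (r * 8 + f).toNat)
          else shield) shield) 0

-- B's body as a function of (file, rank)
def shieldB (m q : Int) (w : Bool) : Int :=
  let base := PySem.Int.band (((7 : Int) <<< m.toNat) >>> 1) 255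
  let d : Int := if w then 1 else -1
  [q + d, q + 2 * d].foldl
    (fun (shield : Int) (r : Int) =>
      if 0 ≤ r ∧ r < 8 then PySem.Int.bor shield (base <<< (8 * r).toNat) else shield) 0

theorem shieldA_eq : ∀ ks w, king_shield_mask ks w = shieldA (PySem.Int.mod ks 8) (PySem.Int.floordiv ks 8) w := fun _ _ => rfl

theorem shieldB_eq : ∀ ks w, king_shield_mask_alt ks w = shieldB (PySem.Int.mod ks 8) (PySem.Int.floordiv ks 8) w := fun _ _ => rfl

theorem foldl_id (l : List Int) (x : Int) : l.foldl (fun s (_ : Int) => s) x = x := by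
  induction l <;> simp_all [List.foldl]

theorem key (m q : Int) (hm0 : 0 ≤ m) (hm8 : m < 8) (w : Bool) : shieldA m q w = shieldB m q w := by
  by_cases hq : -2 ≤ q ∧ q ≤ 9
  · obtain ⟨h1, h2⟩ := hq
    interval_cases m <;> interval_cases q <;> cases w <;> decide
  · have c1 : ¬(0 ≤ q + 1 ∧ q + 1 < 8) := by omega
    have c2 : ¬(0 ≤ q + 2 ∧ q + 2 < 8) := by omega
    have c3 : ¬(0 ≤ q - 1 ∧ q - 1 < 8) := by omega
    have c4 : ¬(0 ≤ q - 2 ∧ q - 2 < 8) := by omega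
    cases w
    · have hr : PySem.List.pyRange (q + -1) (q + -3) (-1) = [q + -1, q + -1 - 1] := by
        rw [PySem.List.pyRange_neg_one_cons (by omega), PySem.List.pyRange_neg_one_cons (by omega),
            PySem.List.pyRange_neg_one_eq_nil (by omega)]
      have cA : ¬(0 ≤ q + -1 ∧ q + -1 < 8) := by omega
      have cB : ¬(0 ≤ q + -1 - 1 ∧ q + -1 - 1 < 8) := by omega
      have cC : ¬(0 ≤ q + 2 * -1 ∧ q + 2 * -1 < 8) := by omega
      simp only [shieldA, shieldB, Bool.false_eq_true, if_false, hr, List.foldl,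
        if_neg cA, if_neg cB, if_neg cC]
      exact foldl_id _ _
    · have hr : PySem.List.pyRange (q + 1) (q + 3) 1 = [q + 1, q + 1 + 1] := by
        rw [PySem.List.pyRange_one_cons (by omega), PySem.List.pyRange_one_cons (by omega),
            PySem.List.pyRange_one_eq_nil (by omega)]
      have cA : ¬(0 ≤ q + 1 ∧ q + 1 < 8) := by omega
      have cB : ¬(0 ≤ q + 1 + 1 ∧ q + 1 + 1 < 8) := by omega
      have cC : ¬(0 ≤ q + 2 * 1 ∧ q + 2 * 1 < 8) := by omega
      simp only [shieldA, shieldB, if_true, hr, List.foldl,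
        if_neg cA, if_neg cB, if_neg cC]
      exact foldl_id _ _

theorem mod8_bounds (ks : Int) : 0 ≤ PySem.Int.mod ks 8 ∧ PySem.Int.mod ks 8 < 8 := by
  rw [PySem.Int.mod_eq_emod_of_pos (by norm_num)]
  exact ⟨Int.emod_nonneg ks (by norm_num), Int.emod_lt_of_pos ks (by norm_num)⟩

-- ===== VERDICT (by name: the statement is the Claim_ definition above) =====
theorem king_shield_mask_spec : Claim_equal_king_shield_mask := by
  intro ks w _
  unfold Spec_king_shield_mask
  rw [shieldA_eq, shieldB_eq]
  exact key _ _ (mod8_bounds ks).1 (mod8_bounds ks).2 w
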